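-- pv_equiv track=rewrite | github.com/NeerajRattehalli/legal.io | companies_by_location_by_year.py | fix_loc
-- ===== SOURCE A (Python) =====
-- abbreviations = ['AL', 'AK', 'AS', 'AZ', 'AR', 'CA', 'CO', 'CT', 'DE', 'DC', 'FM', 'FL', 'GA', 'GU', 'HI', 'ID', 'IL',
--                  'IN', 'IA', 'KS', 'KY', 'LA', 'ME', 'MH', 'MD', 'MA', 'MI', 'MN', 'MS', 'MO', 'MT', 'NE', 'NV', 'NH',
--                  'NJ', 'NM', 'NY', 'NC', 'ND', 'MP', 'OH', 'OK', 'OR', 'PW', 'PA', 'PR', 'RI', 'SC', 'SD', 'TN', 'TX',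
--                  'UT', 'VT', 'VI', 'VA', 'WA', 'WV', 'WI', 'WY'];
--
-- states = ["Alaska", "Alabama", "Arkansas", "American Samoa", "Arizona", "California", "Colorado", "Connecticut",
--           "District of Columbia", "Delaware", "Florida", "Georgia", "Guam", "Hawaii", "Iowa", "Idaho", "Illinois",
--           "Indiana", "Kansas", "Kentucky", "Louisiana", "Massachusetts", "Maryland", "Maine", "Michigan", "Minnesota",
--           "Missouri", "Mississippi", "Montana", "North Carolina", "North Dakota", "Nebraska", "New Hampshire",
--           "New Jersey", "New Mexico", "Nevada", "New York", "Ohio", "Oklahoma", "Oregon", "Pennsylvania", "Puerto Rico",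
--           "Rhode Island", "South Carolina", "South Dakota", "Tennessee", "Texas", "Utah", "Virginia", "Virgin Islands",
--           "Vermont", "Washington", "Wisconsin", "West Virginia", "Wyoming"]
--
-- indian_states = ["Andhra Pradesh", "Arunachal Pradesh", "Assam", "Bihar", "Chhattisgarh", "Goa", "Gujarat", "Haryana",
--                  "Himachal Pradesh", "Jammu and Kashmir", "Jharkhand", "Karnataka", "Kerala", "Madhya Pradesh",
--                  "Maharashtra", "Manipur", "Meghalaya", "Mizoram", "Nagaland", "Odisha", "Punjab", "Rajasthan",
--                  "Sikkim", "Tamil Nadu", "Telangana", "Tripura", "Uttarakhand", "Uttar Pradesh", "West Bengal",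
--                  "Andaman and Nicobar Islands", "Chandigarh", "Dadra and Nagar Haveli", "Daman and Diu", "Delhi",
--                  "Lakshadweep", "Puducherry"]
--
-- def fix_loc(location):
--     trimmed_location = ""
--     rev_location = ''.join(reversed(location))
--     if "," not in location:
--         trimmed_location = location.strip()
--         return ""
--     if (rev_location == "a/n"):
--         return ""
--     for i in range(0, len(rev_location)):
--         if (rev_location[i] == ","):
--             trimmed_location = ''.join(reversed(rev_location[0:i])).strip()
--             break
--     trimmed_location = ''.join([i for i in trimmed_location if not i.isdigit()]).strip()
--     trimmed_location = trimmed_location[0].upper() + trimmed_location[1:]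
--     trimmed_location = trimmed_location.replace(".", "")
--
--     # check for variations in spelling bewteen location names
--     if (trimmed_location == "United States"):
--         trimmed_location = "USA"
--     elif trimmed_location in abbreviations or trimmed_location in states:
--         trimmed_location = "USA"
--     elif trimmed_location in indian_states:
--         trimmed_location = "India"
--     elif (trimmed_location == "FR"):
--         trimmed_location = "France"
--     elif (trimmed_location == "United Kingdom"):
--         trimmed_location = "UK"
--     elif (trimmed_location == "Cundinamarca"):
--         trimmed_location = "Colombia"
--     elif (trimmed_location == "S/n  Santiago de Compostela"):
--         trimmed_location = "Spain"
--     elif (trimmed_location == "ON"):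
--         trimmed_location = "Canada"
--     elif (trimmed_location == "Ontario"):
--         trimmed_location = "Canada"
--     elif (trimmed_location == "Ontario Canada"):
--         trimmed_location = "Canada"
--     elif (trimmed_location == "Melbourne VIC"):
--         trimmed_location = "Australia"
--     elif (trimmed_location == "Sydney"):
--         trimmed_location = "Australia"
--     elif (trimmed_location == "CA and the world"):
--         trimmed_location = "USA"
--     elif (trimmed_location == "BC"):
--         trimmed_location = "Canada"
--     elif (trimmed_location == "Western US"):
--         trimmed_location = "USA"
--     elif (trimmed_location == "Toronto ON  MB G"):
--         trimmed_location = "Canada"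
--     elif (trimmed_location == "Fla"):
--         trimmed_location = "Canada"
--     elif (trimmed_location == "The Netherlands"):
--         trimmed_location = "Netherlands"
--     return trimmed_location
-- ===== SOURCE B (Python) =====
-- abbreviations = ['AL', 'AK', 'AS', 'AZ', 'AR', 'CA', 'CO', 'CT', 'DE', 'DC', 'FM', 'FL', 'GA', 'GU', 'HI', 'ID', 'IL',
--                  'IN', 'IA', 'KS', 'KY', 'LA', 'ME', 'MH', 'MD', 'MA', 'MI', 'MN', 'MS', 'MO', 'MT', 'NE', 'NV', 'NH',
--                  'NJ', 'NM', 'NY', 'NC', 'ND', 'MP', 'OH', 'OK', 'OR', 'PW', 'PA', 'PR', 'RI', 'SC', 'SD', 'TN', 'TX',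
--                  'UT', 'VT', 'VI', 'VA', 'WA', 'WV', 'WI', 'WY']
--
-- states = ["Alaska", "Alabama", "Arkansas", "American Samoa", "Arizona", "California", "Colorado", "Connecticut",
--           "District of Columbia", "Delaware", "Florida", "Georgia", "Guam", "Hawaii", "Iowa", "Idaho", "Illinois",
--           "Indiana", "Kansas", "Kentucky", "Louisiana", "Massachusetts", "Maryland", "Maine", "Michigan", "Minnesota",
--           "Missouri", "Mississippi", "Montana", "North Carolina", "North Dakota", "Nebraska", "New Hampshire",
--           "New Jersey", "New Mexico", "Nevada", "New York", "Ohio", "Oklahoma", "Oregon", "Pennsylvania", "Puerto Rico",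
--           "Rhode Island", "South Carolina", "South Dakota", "Tennessee", "Texas", "Utah", "Virginia", "Virgin Islands",
--           "Vermont", "Washington", "Wisconsin", "West Virginia", "Wyoming"]
--
-- indian_states = ["Andhra Pradesh", "Arunachal Pradesh", "Assam", "Bihar", "Chhattisgarh", "Goa", "Gujarat", "Haryana",
--                  "Himachal Pradesh", "Jammu and Kashmir", "Jharkhand", "Karnataka", "Kerala", "Madhya Pradesh",
--                  "Maharashtra", "Manipur", "Meghalaya", "Mizoram", "Nagaland", "Odisha", "Punjab", "Rajasthan",
--                  "Sikkim", "Tamil Nadu", "Telangana", "Tripura", "Uttarakhand", "Uttar Pradesh", "West Bengal",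
--                  "Andaman and Nicobar Islands", "Chandigarh", "Dadra and Nagar Haveli", "Daman and Diu", "Delhi",
--                  "Lakshadweep", "Puducherry"]
--
-- _usa = set(abbreviations + states)
-- _india = set(indian_states)
-- _aliases = {"United States": "USA", "FR": "France", "United Kingdom": "UK",
--             "Cundinamarca": "Colombia", "S/n  Santiago de Compostela": "Spain",
--             "ON": "Canada", "Ontario": "Canada", "Ontario Canada": "Canada",
--             "Melbourne VIC": "Australia", "Sydney": "Australia",
--             "CA and the world": "USA", "BC": "Canada", "Western US": "USA",
--             "Toronto ON  MB G": "Canada", "Fla": "Canada",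
--             "The Netherlands": "Netherlands"}
--
-- def fix_loc(location):
--     if "," not in location:
--         return ""
--     tail = []
--     for c in location:
--         if c == ",":
--             tail.clear()
--         else:
--             tail.append(c)
--     t = "".join(tail).strip()
--     t = "".join(c for c in t if not c.isdigit()).strip()
--     t = (t[0].upper() + t[1:]).replace(".", "")
--     if t in _usa:
--         return "USA"
--     if t in _india:
--         return "India"
--     return _aliases.get(t, t)
-- ===== Notes on version B (the rewrite author's own statement) =====
-- stated objective: simpler
-- what changed: B extracts the text after the last comma with one forward fold (reset on comma) instead of A's reverse-then-index-scan-with-break, and replaces A's 19-branch elif cascade with two set-membership checks plus a single alias-table lookup with default.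
import Mathlib
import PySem

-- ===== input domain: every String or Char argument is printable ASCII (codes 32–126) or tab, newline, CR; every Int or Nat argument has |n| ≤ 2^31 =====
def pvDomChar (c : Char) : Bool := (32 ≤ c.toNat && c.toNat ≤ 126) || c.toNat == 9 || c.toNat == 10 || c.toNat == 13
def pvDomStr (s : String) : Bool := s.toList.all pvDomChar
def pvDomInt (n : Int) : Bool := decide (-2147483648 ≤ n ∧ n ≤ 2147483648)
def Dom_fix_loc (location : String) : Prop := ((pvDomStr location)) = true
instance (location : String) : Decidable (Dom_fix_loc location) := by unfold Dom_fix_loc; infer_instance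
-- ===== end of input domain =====

-- B replaces A's reverse-and-index-scan tail extraction by one forward fold and the
-- 19-branch elif cascade by set membership plus one alias-table lookup (objective: simpler).

-- shared module-level data (the three lists from the Python module)
def pvAbbrevs : List String := ["AL", "AK", "AS", "AZ", "AR", "CA", "CO", "CT", "DE", "DC", "FM", "FL", "GA", "GU", "HI", "ID", "IL",
  "IN", "IA", "KS", "KY", "LA", "ME", "MH", "MD", "MA", "MI", "MN", "MS", "MO", "MT", "NE", "NV", "NH",
  "NJ", "NM", "NY", "NC", "ND", "MP", "OH", "OK", "OR", "PW", "PA", "PR", "RI", "SC", "SD", "TN", "TX",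
  "UT", "VT", "VI", "VA", "WA", "WV", "WI", "WY"]

def pvStates : List String := ["Alaska", "Alabama", "Arkansas", "American Samoa", "Arizona", "California", "Colorado", "Connecticut",
  "District of Columbia", "Delaware", "Florida", "Georgia", "Guam", "Hawaii", "Iowa", "Idaho", "Illinois",
  "Indiana", "Kansas", "Kentucky", "Louisiana", "Massachusetts", "Maryland", "Maine", "Michigan", "Minnesota",
  "Missouri", "Mississippi", "Montana", "North Carolina", "North Dakota", "Nebraska", "New Hampshire",
  "New Jersey", "New Mexico", "Nevada", "New York", "Ohio", "Oklahoma", "Oregon", "Pennsylvania", "Puerto Rico",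
  "Rhode Island", "South Carolina", "South Dakota", "Tennessee", "Texas", "Utah", "Virginia", "Virgin Islands",
  "Vermont", "Washington", "Wisconsin", "West Virginia", "Wyoming"]

def pvIndian : List String := ["Andhra Pradesh", "Arunachal Pradesh", "Assam", "Bihar", "Chhattisgarh", "Goa", "Gujarat", "Haryana",
  "Himachal Pradesh", "Jammu and Kashmir", "Jharkhand", "Karnataka", "Kerala", "Madhya Pradesh",
  "Maharashtra", "Manipur", "Meghalaya", "Mizoram", "Nagaland", "Odisha", "Punjab", "Rajasthan",
  "Sikkim", "Tamil Nadu", "Telangana", "Tripura", "Uttarakhand", "Uttar Pradesh", "West Bengal",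
  "Andaman and Nicobar Islands", "Chandigarh", "Dadra and Nagar Haveli", "Daman and Diu", "Delhi",
  "Lakshadweep", "Puducherry"]

-- ===== PORT A =====
-- A's 'for i in range(0, len(rev)): if rev[i]==",": trimmed = reversed(rev[0:i]).strip(); break'
-- (seen is the already-scanned prefix rev[0:i]; falling off the loop leaves trimmed_location = "")
def pvScanA (seen : List Char) : List Char → List Char
  | [] => []
  | c :: rest => if c = ',' then PySem.Chars.strip seen.reverse else pvScanA (seen ++ [c]) rest

-- A's elif cascade, in Python's order
def pvResolveA (t : String) : String :=
  if t = "United States" then "USA"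
  else if pvAbbrevs.contains t || pvStates.contains t then "USA"
  else if pvIndian.contains t then "India"
  else if t = "FR" then "France"
  else if t = "United Kingdom" then "UK"
  else if t = "Cundinamarca" then "Colombia"
  else if t = "S/n  Santiago de Compostela" then "Spain"
  else if t = "ON" then "Canada"
  else if t = "Ontario" then "Canada"
  else if t = "Ontario Canada" then "Canada"
  else if t = "Melbourne VIC" then "Australia"
  else if t = "Sydney" then "Australia"
  else if t = "CA and the world" then "USA"
  else if t = "BC" then "Canada"
  else if t = "Western US" then "USA"
  else if t = "Toronto ON  MB G" then "Canada"
  else if t = "Fla" then "Canada"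
  else if t = "The Netherlands" then "Netherlands"
  else t

def fix_loc (location : String) : String :=
  let rev := location.toList.reverse
  if PySem.Str.isIn "," location = false then ""
  else if rev = "a/n".toList then ""
  else
    let t1 := pvScanA [] rev
    let t2 := PySem.Chars.strip (List.filter (fun c => !(PySem.Chars.isdigit c)) t1)
    match PySem.List.pyGet? t2 0 with
    | none => ""   -- Python raises IndexError on trimmed_location[0] here; excluded by Pre_
    | some c =>
      pvResolveA (String.ofList (PySem.Chars.replace
        (PySem.Chars.upper [c] ++ PySem.Chars.slice t2 (some 1) none) ['.'] []))

-- ===== PORT B =====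
def pvUsaSet : PySem.Set String := PySem.Set.ofList (pvAbbrevs ++ pvStates)
def pvIndiaSet : PySem.Set String := PySem.Set.ofList pvIndian
def pvAliases : PySem.Dict String String := PySem.Dict.mk
  [("United States", "USA"), ("FR", "France"), ("United Kingdom", "UK"),
   ("Cundinamarca", "Colombia"), ("S/n  Santiago de Compostela", "Spain"),
   ("ON", "Canada"), ("Ontario", "Canada"), ("Ontario Canada", "Canada"),
   ("Melbourne VIC", "Australia"), ("Sydney", "Australia"),
   ("CA and the world", "USA"), ("BC", "Canada"), ("Western US", "USA"),
   ("Toronto ON  MB G", "Canada"), ("Fla", "Canada"),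
   ("The Netherlands", "Netherlands")]

def pvResolveB (t : String) : String :=
  if pvUsaSet.contains t then "USA"
  else if pvIndiaSet.contains t then "India"
  else pvAliases.getD t t

def fix_loc_alt (location : String) : String :=
  if PySem.Str.isIn "," location = false then ""
  else
    let tail := location.toList.foldl (fun acc c => if c = ',' then [] else acc ++ [c]) []
    let t1 := PySem.Chars.strip tail
    let t2 := PySem.Chars.strip (List.filter (fun c => !(PySem.Chars.isdigit c)) t1)
    match PySem.List.pyGet? t2 0 with
    | none => ""   -- Source B raises IndexError on t[0] here; excluded by Pre_
    | some c =>
      pvResolveB (String.ofList (PySem.Chars.replace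
        (PySem.Chars.upper [c] ++ PySem.Chars.slice t2 (some 1) none) ['.'] []))

-- ===== PRECONDITION & SPEC =====
-- Pre_ excludes exactly the inputs on which the Python A raises IndexError (t[0] on an
-- empty trimmed tail): a comma is present but everything after the last comma is digits/whitespace.
def Pre_fix_loc (location : String) : Prop :=
  PySem.Str.isIn "," location = true →
    (location.toList.reverse.takeWhile (fun c => c ≠ ',')).any
      (fun c => !PySem.Chars.isdigit c && !PySem.Chars.isspace c) = true
instance (location : String) : Decidable (Pre_fix_loc location) := by unfold Pre_fix_loc; infer_instance

def pvWitness_fix_loc : String := "a,b"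

def Spec_fix_loc (location : String) (out : String) : Prop := out = fix_loc_alt location
instance (location : String) (out : String) : Decidable (Spec_fix_loc location out) := by unfold Spec_fix_loc; infer_instance

-- ===== CLAIM (what is proved, stated in full; the proofs are below) =====
def Claim_equal_fix_loc : Prop := ∀ (location : String), Dom_fix_loc location → Pre_fix_loc location → Spec_fix_loc location (fix_loc location)

-- ===== LEMMAS AND PROOFS =====

-- the suffix of cs after its last comma
def pvTailAfter (cs : List Char) : List Char := (cs.reverse.takeWhile (fun c => c ≠ ',')).reverse

theorem pvTakeWhile_stop {p : Char → Bool} (xs ys : List Char) (h : ∃ x ∈ xs, p x = false) :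
    (xs ++ ys).takeWhile p = xs.takeWhile p := by
  rw [List.takeWhile_append, if_neg]
  intro hlen
  obtain ⟨x, hx, hpx⟩ := h
  have heq : xs.takeWhile p = xs := (List.takeWhile_prefix p).eq_of_length hlen
  have := List.mem_takeWhile_imp (heq ▸ hx)
  simp [hpx] at this

theorem pvTakeWhile_all {p : Char → Bool} (xs ys : List Char) (h : ∀ x ∈ xs, p x = true) :
    (xs ++ ys).takeWhile p = xs ++ ys.takeWhile p := by
  rw [List.takeWhile_append, if_pos]
  rw [List.takeWhile_eq_self_iff.mpr h]

theorem pvTailAfter_cons_mem (c : Char) (rest : List Char) (h : ',' ∈ rest) :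
    pvTailAfter (c :: rest) = pvTailAfter rest := by
  unfold pvTailAfter
  rw [List.reverse_cons, pvTakeWhile_stop]
  exact ⟨',', by simpa using h, by simp⟩

theorem pvTailAfter_comma (rest : List Char) (h : ',' ∉ rest) :
    pvTailAfter (',' :: rest) = rest := by
  unfold pvTailAfter
  rw [List.reverse_cons, pvTakeWhile_all]
  · simp
  · intro x hx
    simp only [List.mem_reverse] at hx
    have hne : x ≠ ',' := fun hh => h (hh ▸ hx)
    simp [hne]

theorem pvScanA_spec (l : List Char) : ∀ seen : List Char,
    pvScanA seen l = if ',' ∈ l then PySem.Chars.strip (seen ++ l.takeWhile (fun c => c ≠ ',')).reverse else [] := by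
  induction l with
  | nil => intro seen; simp [pvScanA]
  | cons c rest ih =>
    intro seen
    by_cases hc : c = ','
    · subst hc; simp [pvScanA]
    · have h' : ¬(',' = c) := fun h => hc h.symm
      simp [pvScanA, hc, h', ih (seen ++ [c]), List.append_assoc]

theorem pvFoldl_spec (cs : List Char) : ∀ acc : List Char,
    cs.foldl (fun acc c => if c = ',' then [] else acc ++ [c]) acc
      = if ',' ∈ cs then pvTailAfter cs else acc ++ cs := by
  induction cs with
  | nil => intro acc; simp
  | cons c rest ih =>
    intro acc
    by_cases hc : c = ','
    · subst hc
      rw [List.foldl_cons, if_pos rfl, ih [], if_pos (List.mem_cons_self)]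
      by_cases hr : ',' ∈ rest
      · rw [if_pos hr, pvTailAfter_cons_mem _ _ hr]
      · rw [if_neg hr, pvTailAfter_comma _ hr]; simp
    · have h' : ¬(',' = c) := fun h => hc h.symm
      rw [List.foldl_cons, if_neg hc, ih (acc ++ [c])]
      by_cases hr : ',' ∈ rest
      · rw [if_pos hr, if_pos (List.mem_cons_of_mem _ hr), pvTailAfter_cons_mem _ _ hr]
      · rw [if_neg hr, if_neg (by simp [h', hr])]
        simp

theorem pvTail_eq (cs : List Char) (h : ',' ∈ cs) :
    pvScanA [] cs.reverse
      = PySem.Chars.strip (cs.foldl (fun acc c => if c = ',' then [] else acc ++ [c]) []) := by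
  rw [pvFoldl_spec, if_pos h, pvScanA_spec, if_pos (by simpa using h)]
  simp [pvTailAfter]

set_option maxRecDepth 40000 in
set_option maxHeartbeats 3000000 in
theorem pvResolve_eq (t : String) : pvResolveA t = pvResolveB t := by
  by_cases k1 : t = "United States"; · subst k1; decide
  by_cases k2 : t = "FR"; · subst k2; decide
  by_cases k3 : t = "United Kingdom"; · subst k3; decide
  by_cases k4 : t = "Cundinamarca"; · subst k4; decide
  by_cases k5 : t = "S/n  Santiago de Compostela"; · subst k5; decide
  by_cases k6 : t = "ON"; · subst k6; decide
  by_cases k7 : t = "Ontario"; · subst k7; decide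
  by_cases k8 : t = "Ontario Canada"; · subst k8; decide
  by_cases k9 : t = "Melbourne VIC"; · subst k9; decide
  by_cases k10 : t = "Sydney"; · subst k10; decide
  by_cases k11 : t = "CA and the world"; · subst k11; decide
  by_cases k12 : t = "BC"; · subst k12; decide
  by_cases k13 : t = "Western US"; · subst k13; decide
  by_cases k14 : t = "Toronto ON  MB G"; · subst k14; decide
  by_cases k15 : t = "Fla"; · subst k15; decide
  by_cases k16 : t = "The Netherlands"; · subst k16; decide
  by_cases hu : (pvAbbrevs.contains t || pvStates.contains t) = true
  · have husa : pvUsaSet.contains t = true := by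
      simp only [Bool.or_eq_true, List.contains_iff_mem] at hu
      rw [PySem.Set.contains_iff]
      show t ∈ PySem.Set.ofList (pvAbbrevs ++ pvStates)
      rw [PySem.Set.mem_ofList, List.mem_append]
      exact hu
    unfold pvResolveA pvResolveB
    rw [if_pos husa, if_neg k1, if_pos hu]
  · have husa : pvUsaSet.contains t = false := by
      rw [Bool.eq_false_iff]
      intro hm
      rw [PySem.Set.contains_iff] at hm
      have hm2 : t ∈ pvAbbrevs ++ pvStates := (PySem.Set.mem_ofList _ _).mp hm
      rw [List.mem_append] at hm2
      apply hu
      simp only [Bool.or_eq_true, List.contains_iff_mem]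
      exact hm2
    by_cases hi : pvIndian.contains t = true
    · have his : pvIndiaSet.contains t = true := by
        rw [PySem.Set.contains_iff]
        show t ∈ PySem.Set.ofList pvIndian
        rw [PySem.Set.mem_ofList]
        exact List.contains_iff_mem.mp hi
      unfold pvResolveA pvResolveB
      rw [if_neg k1, if_neg hu, if_pos hi, if_neg (fun hm => Bool.false_ne_true (husa ▸ hm)), if_pos his]
    · have his : pvIndiaSet.contains t = false := by
        rw [Bool.eq_false_iff]
        intro hm
        rw [PySem.Set.contains_iff] at hm
        have hm2 : t ∈ pvIndian := (PySem.Set.mem_ofList _ _).mp hm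
        exact hi (List.contains_iff_mem.mpr hm2)
      have hc : pvAliases.contains t = false := by
        simp [pvAliases, PySem.Dict.contains_mk, Ne.symm k1, Ne.symm k2, Ne.symm k3, Ne.symm k4,
          Ne.symm k5, Ne.symm k6, Ne.symm k7, Ne.symm k8, Ne.symm k9, Ne.symm k10, Ne.symm k11,
          Ne.symm k12, Ne.symm k13, Ne.symm k14, Ne.symm k15, Ne.symm k16]
      unfold pvResolveA pvResolveB
      rw [PySem.Dict.getD_of_not_contains _ _ hc]
      rw [if_neg k1, if_neg hu, if_neg hi, if_neg k2, if_neg k3, if_neg k4, if_neg k5, if_neg k6,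
        if_neg k7, if_neg k8, if_neg k9, if_neg k10, if_neg k11, if_neg k12, if_neg k13, if_neg k14,
        if_neg k15, if_neg k16, if_neg (fun hm => Bool.false_ne_true (husa ▸ hm)),
        if_neg (fun hm => Bool.false_ne_true (his ▸ hm))]

-- the n/a guard of A never fires once a comma is present
theorem pvNa_guard (cs : List Char) (h : ',' ∈ cs) : cs.reverse ≠ "a/n".toList := by
  intro he
  have hz : cs = ['n', '/', 'a'] := by
    have h2 := congrArg List.reverse he
    rw [List.reverse_reverse] at h2
    rw [h2]; rfl
  rw [hz] at h
  simp at h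

-- ===== VERDICT (by name: the statement is the Claim_ definition above) =====
set_option maxRecDepth 10000 in
theorem fix_loc_spec : Claim_equal_fix_loc := by
  intro location _ _
  unfold Spec_fix_loc fix_loc fix_loc_alt
  cases hb : PySem.Str.isIn "," location with
  | false => simp only [if_true]
  | true =>
    have hmem : ',' ∈ location.toList := by
      have hinf := (PySem.Str.isIn_iff_infix (sub := ",") (s := location)).mp hb
      exact hinf.subset (by decide)
    simp only [Bool.true_eq_false, if_false]
    rw [if_neg (pvNa_guard _ hmem), pvTail_eq _ hmem]
    cases PySem.List.pyGet? (PySem.Chars.strip (List.filter (fun c => !(PySem.Chars.isdigit c))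
      (PySem.Chars.strip (location.toList.foldl (fun acc c => if c = ',' then [] else acc ++ [c]) [])))) 0 with
    | none => rfl
    | some c => exact pvResolve_eq _
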